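-- pv_equiv track=rewrite | github.com/sethtroisi/hanabi-tf | OldCode/Greedy.py | reduce_hand
-- ===== SOURCE A (Python) =====
-- COLORS = ["B", "G", "R", "W", "Y"]
--
-- def reduce_hand(hand):
--     color_map = {}
--
--     reduced_hand = []
--     for c, v in hand:
--         if c not in color_map:
--             color_map[c] = COLORS[len(color_map)]
--         mapped_color = color_map[c]
--         reduced_hand.append( (mapped_color, v) )
--
--     return tuple(reduced_hand)
-- ===== SOURCE B (Python) =====
-- COLORS = ["B", "G", "R", "W", "Y"]
--
-- def reduce_hand(hand):
--     colors = [c for c, _ in hand]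
--     order = sorted(set(colors), key=colors.index)
--     return tuple((COLORS[order.index(c)], v) for c, v in hand)
-- ===== Notes on version B (the rewrite author's own statement) =====
-- stated objective: simpler
-- what changed: A incrementally grows a color dict while emitting output in one interleaved loop; B has no dict and no accumulator loop at all: it canonicalises the distinct colors by sorting the set by first-occurrence index and then looks each color up by position in that list.
import Mathlib
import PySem

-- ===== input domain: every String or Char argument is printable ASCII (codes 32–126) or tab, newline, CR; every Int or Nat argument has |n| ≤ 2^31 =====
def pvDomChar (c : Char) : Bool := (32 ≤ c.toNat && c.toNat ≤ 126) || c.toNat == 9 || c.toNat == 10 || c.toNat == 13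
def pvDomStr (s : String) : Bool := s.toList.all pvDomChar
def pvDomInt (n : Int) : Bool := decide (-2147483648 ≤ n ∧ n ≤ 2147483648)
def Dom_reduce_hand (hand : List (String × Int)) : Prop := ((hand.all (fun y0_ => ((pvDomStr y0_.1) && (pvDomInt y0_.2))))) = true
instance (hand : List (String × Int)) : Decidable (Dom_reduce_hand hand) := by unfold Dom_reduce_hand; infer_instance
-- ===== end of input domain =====

-- B replaces A's interleaved dict-growing loop by sorting the set of colors by
-- first-occurrence index and looking colors up by position in that list (objective: simpler).

def COLORS : List String := ["B", "G", "R", "W", "Y"]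

-- ===== PORT A =====
-- A: one loop; the dict grows while the output is built; COLORS[len(color_map)] is the fresh label.
-- (pyGetD with default "" stands for COLORS[...]; under Pre_ the index is always in range.)
def reduce_hand (hand : List (String × Int)) : List (String × Int) :=
  (hand.foldl
    (fun (st : PySem.Dict String String × List (String × Int)) p =>
      let cm := if st.1.contains p.1 then st.1
                else st.1.insert p.1 (PySem.List.pyGetD COLORS (st.1.size : Int) "")
      (cm, st.2 ++ [(cm.getD p.1 "", p.2)]))
    (PySem.Dict.empty, [])).2

-- ===== PORT B =====
-- B: order = sorted(set(colors), key=colors.index); result: COLORS[order.index(c)] per card.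
-- colors.index / order.index always succeed (the element is a member), so '.getD 0' is exact;
-- pyGetD with default "" stands for COLORS[...] (in range under Pre_).
def reduce_hand_alt (hand : List (String × Int)) : List (String × Int) :=
  let colors := hand.map (fun p => p.1)
  let order := PySem.List.sorted (PySem.Set.ofList colors)
    (fun c => ((PySem.List.index? colors c).getD 0 : Nat)) false
  hand.map (fun p =>
    (PySem.List.pyGetD COLORS (((PySem.List.index? order p.1).getD 0 : Nat) : Int) "", p.2))

-- ===== PRECONDITION & SPEC =====
-- Pre_ excludes hands with more than 5 distinct colors, on which both Pythons raise IndexError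
-- at COLORS[...].
def Pre_reduce_hand (hand : List (String × Int)) : Prop :=
  (PySem.List.dedup (hand.map (fun p => p.1))).length ≤ 5
instance (hand : List (String × Int)) : Decidable (Pre_reduce_hand hand) := by
  unfold Pre_reduce_hand; infer_instance

def pvWitness_reduce_hand : (List (String × Int)) := [("R", 1), ("R", 2), ("Q", 3)]

def Spec_reduce_hand (hand : List (String × Int)) (out : List (String × Int)) : Prop := out = reduce_hand_alt hand
instance (hand : List (String × Int)) (out : List (String × Int)) : Decidable (Spec_reduce_hand hand out) := by unfold Spec_reduce_hand; infer_instance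

-- ===== CLAIM (what is proved, stated in full; the proofs are below) =====
def Claim_equal_reduce_hand : Prop := ∀ (hand : List (String × Int)), Dom_reduce_hand hand → Pre_reduce_hand hand → Spec_reduce_hand hand (reduce_hand hand)

-- ===== LEMMAS AND PROOFS =====

-- the dict A has built after seeing the (deduped) colors l
def dictOf (l : List String) : PySem.Dict String String :=
  PySem.Dict.ofList ((PySem.List.enumerate l).map (fun q => (q.2, PySem.List.pyGetD COLORS q.1 "")))
lemma dictOf_append (l : List String) (x : String) :
    dictOf (l ++ [x]) = (dictOf l).insert x (PySem.List.pyGetD COLORS (l.length : Int) "") := by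
  simp [dictOf, PySem.Dict.ofList, PySem.Dict.update, PySem.List.enumerate_append, List.foldl_append]
lemma get?_dictOf (l : List String) (hn : l.Nodup) (c : String) :
    (dictOf l).get? c
      = (PySem.List.index? l c).map (fun (k : Nat) => PySem.List.pyGetD COLORS (k : Int) "") := by
  induction l using List.reverseRecOn with
  | nil => simp [dictOf, PySem.Dict.ofList, PySem.Dict.update, PySem.List.index?_eq_idxOf?]
  | append_singleton l x ih =>
    rw [List.nodup_append] at hn
    have hn' : l.Nodup := hn.1
    have hx : x ∉ l := by
      intro h; exact (hn.2.2 x h x (List.mem_singleton_self x)) rfl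
    rw [dictOf_append]
    by_cases hc : c = x
    · subst hc
      rw [PySem.Dict.get?_insert_self, PySem.List.index?_append_singleton_self l _ hx]
      rfl
    · rw [PySem.Dict.get?_insert_of_ne _ _ hc, ih hn']
      by_cases hm : c ∈ l
      · rw [PySem.List.index?_append_of_mem _ hm]
      · have h1 : PySem.List.index? l c = none := (PySem.List.index?_eq_none_iff _ _).mpr hm
        have h2 : PySem.List.index? (l ++ [x]) c = none := by
          exact (PySem.List.index?_eq_none_iff _ _).mpr (by simp [hm, hc])
        rw [h1, h2]
lemma size_dictOf (l : List String) (hn : l.Nodup) : (dictOf l).size = l.length := by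
  induction l using List.reverseRecOn with
  | nil => rfl
  | append_singleton l x ih =>
    rw [List.nodup_append] at hn
    have hn' : l.Nodup := hn.1
    have hx : x ∉ l := by
      intro h; exact (hn.2.2 x h x (List.mem_singleton_self x)) rfl
    have hcont : (dictOf l).contains x = false := by
      rw [PySem.Dict.contains_eq_isSome_get?, get?_dictOf l hn',
        (PySem.List.index?_eq_none_iff _ _).mpr hx]
      rfl
    rw [dictOf_append, PySem.Dict.size_insert, hcont, ih hn']
    simp

def mapOf (cs : List String) : PySem.Dict String String := dictOf (PySem.List.dedup cs)

lemma dedup_append_singleton (cs : List String) (c : String) :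
    PySem.List.dedup (cs ++ [c])
      = if c ∈ cs then PySem.List.dedup cs else PySem.List.dedup cs ++ [c] := by
  simp only [PySem.List.dedup_eq_ofList, PySem.Set.ofList_eq_foldl, List.foldl_append,
    List.foldl_cons, List.foldl_nil]
  show PySem.Set.add _ c = _
  rw [PySem.Set.add]
  have : (List.foldl PySem.Set.add [] cs).contains c = decide (c ∈ cs) := by
    rw [← PySem.Set.ofList_eq_foldl]
    show PySem.Set.contains _ _ = _
    simp [PySem.Set.contains, PySem.Set.mem_ofList cs c]
  rw [this]
  by_cases hm : c ∈ cs
  · simp [hm]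
  · simp [hm]

lemma contains_mapOf (cs : List String) (c : String) :
    (mapOf cs).contains c = decide (c ∈ cs) := by
  rw [mapOf, PySem.Dict.contains_eq_isSome_get?, get?_dictOf _ (PySem.List.nodup_dedup cs)]
  by_cases hm : c ∈ cs
  · have hmd : c ∈ PySem.List.dedup cs := (PySem.List.mem_dedup _ _).mpr hm
    have := (PySem.List.index?_isSome_iff (PySem.List.dedup cs) c).mpr hmd
    cases h : PySem.List.index? (PySem.List.dedup cs) c
    · rw [h] at this; simp at this
    · simp [hm]
  · have hmd : c ∉ PySem.List.dedup cs := fun h => hm ((PySem.List.mem_dedup _ _).mp h)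
    rw [(PySem.List.index?_eq_none_iff _ _).mpr hmd]
    simp [hm]

lemma mapOf_step (cs : List String) (c : String) :
    mapOf (cs ++ [c])
      = if (mapOf cs).contains c then mapOf cs
        else (mapOf cs).insert c (PySem.List.pyGetD COLORS ((mapOf cs).size : Int) "") := by
  rw [contains_mapOf, mapOf, mapOf, dedup_append_singleton]
  by_cases hm : c ∈ cs
  · have hmd : c ∈ PySem.List.dedup cs := (PySem.List.mem_dedup _ _).mpr hm
    simp [hm]
  · simp only [hm, if_false, decide_eq_true_eq]
    rw [dictOf_append, size_dictOf _ (PySem.List.nodup_dedup cs)]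

lemma dedup_append_prefix (cs ds : List String) :
    ∃ t, PySem.List.dedup (cs ++ ds) = PySem.List.dedup cs ++ t := by
  induction ds using List.reverseRecOn with
  | nil => exact ⟨[], by simp⟩
  | append_singleton ds d ih =>
    obtain ⟨t, ht⟩ := ih
    rw [← List.append_assoc, dedup_append_singleton]
    split
    · exact ⟨t, ht⟩
    · exact ⟨t ++ [d], by rw [ht, List.append_assoc]⟩

lemma mapOf_stable (cs ds : List String) (c : String) (hc : c ∈ cs) :
    (mapOf (cs ++ ds)).getD c "" = (mapOf cs).getD c "" := by
  have hcd : c ∈ PySem.List.dedup cs := (PySem.List.mem_dedup _ _).mpr hc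
  obtain ⟨t, ht⟩ := dedup_append_prefix cs ds
  rw [PySem.Dict.getD_eq_get?_getD, PySem.Dict.getD_eq_get?_getD, mapOf, mapOf,
    get?_dictOf _ (PySem.List.nodup_dedup _), get?_dictOf _ (PySem.List.nodup_dedup _),
    ht, PySem.List.index?_append_of_mem _ hcd]

def stepF (st : PySem.Dict String String × List (String × Int)) (p : String × Int) :
    PySem.Dict String String × List (String × Int) :=
  let cm := if st.1.contains p.1 then st.1
            else st.1.insert p.1 (PySem.List.pyGetD COLORS (st.1.size : Int) "")
  (cm, st.2 ++ [(cm.getD p.1 "", p.2)])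

lemma inv (suf pre : List (String × Int)) :
    suf.foldl stepF
      (mapOf (pre.map (fun p => p.1)),
       pre.map (fun q => ((mapOf (pre.map (fun p => p.1))).getD q.1 "", q.2)))
    = (mapOf ((pre ++ suf).map (fun p => p.1)),
       (pre ++ suf).map (fun q => ((mapOf ((pre ++ suf).map (fun p => p.1))).getD q.1 "", q.2))) := by
  induction suf generalizing pre with
  | nil => simp
  | cons p suf ih =>
    rw [List.foldl_cons]
    have hstep : mapOf ((pre ++ [p]).map (fun p => p.1))
        = if (mapOf (pre.map (fun p => p.1))).contains p.1 then mapOf (pre.map (fun p => p.1))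
          else (mapOf (pre.map (fun p => p.1))).insert p.1
            (PySem.List.pyGetD COLORS ((mapOf (pre.map (fun p => p.1))).size : Int) "") := by
      rw [List.map_append]
      exact mapOf_step _ _
    have hone :
        stepF
          (mapOf (pre.map (fun p => p.1)),
           pre.map (fun q => ((mapOf (pre.map (fun p => p.1))).getD q.1 "", q.2)))
          p
        = (mapOf ((pre ++ [p]).map (fun p => p.1)),
           (pre ++ [p]).map (fun q => ((mapOf ((pre ++ [p]).map (fun p => p.1))).getD q.1 "", q.2))) := by
      unfold stepF
      rw [← hstep]
      refine Prod.ext ?_ ?_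
      · rfl
      · show pre.map (fun q => ((mapOf (pre.map (fun p => p.1))).getD q.1 "", q.2))
            ++ [((mapOf ((pre ++ [p]).map (fun p => p.1))).getD p.1 "", p.2)]
          = (pre ++ [p]).map (fun q => ((mapOf ((pre ++ [p]).map (fun p => p.1))).getD q.1 "", q.2))
        rw [List.map_append (f := fun q : String × Int =>
          ((mapOf ((pre ++ [p]).map (fun p => p.1))).getD q.1 "", q.2))]
        congr 1
        apply List.map_congr_left
        intro q hq
        have : (mapOf ((pre ++ [p]).map (fun p => p.1))).getD q.1 ""
            = (mapOf (pre.map (fun p => p.1))).getD q.1 "" := by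
          rw [List.map_append]
          exact mapOf_stable _ _ _ (List.mem_map_of_mem hq)
        rw [this]
    rw [hone]
    have := ih (pre ++ [p])
    rw [List.append_assoc] at this
    simpa using this

-- A's result, characterised: each card's color looked up in the dict of all colors.
lemma reduce_hand_eq (hand : List (String × Int)) :
    reduce_hand hand
      = hand.map (fun q => ((mapOf (hand.map (fun p => p.1))).getD q.1 "", q.2)) := by
  unfold reduce_hand
  show (hand.foldl stepF (PySem.Dict.empty, [])).2 = _
  have h := inv hand []
  simp only [List.map_nil, List.nil_append] at h
  have h0 : mapOf ([] : List String) = PySem.Dict.empty := rfl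
  rw [h0] at h
  rw [h]

-- the deduped color list is strictly increasing under the first-occurrence-index key,
-- so B's sort leaves it unchanged
lemma dedup_pairwise_index (cs : List String) :
    (PySem.List.dedup cs).Pairwise
      (fun a b => ((PySem.List.index? cs a).getD 0 : Nat) < (PySem.List.index? cs b).getD 0) := by
  induction cs using List.reverseRecOn with
  | nil => simp [PySem.List.dedup_eq_ofList, PySem.Set.ofList_eq_foldl]
  | append_singleton cs c ih =>
    have hcong : (PySem.List.dedup cs).Pairwise
        (fun a b => ((PySem.List.index? (cs ++ [c]) a).getD 0 : Nat)
          < (PySem.List.index? (cs ++ [c]) b).getD 0) := by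
      refine List.Pairwise.imp_of_mem ?_ ih
      intro a b ha hb hlt
      rw [PySem.List.index?_append_of_mem _ ((PySem.List.mem_dedup _ _).mp ha),
        PySem.List.index?_append_of_mem _ ((PySem.List.mem_dedup _ _).mp hb)]
      exact hlt
    rw [dedup_append_singleton]
    by_cases hm : c ∈ cs
    · simpa [hm] using hcong
    · simp only [hm, if_false]
      rw [List.pairwise_append]
      refine ⟨hcong, by simp, ?_⟩
      intro a ha b hb
      rw [List.mem_singleton] at hb; rw [hb]
      have hac : a ∈ cs := (PySem.List.mem_dedup _ _).mp ha
      rw [PySem.List.index?_append_of_mem _ hac,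
        PySem.List.index?_append_singleton_self cs c hm]
      obtain ⟨k, hk⟩ := Option.isSome_iff_exists.mp
        ((PySem.List.index?_isSome_iff cs a).mpr hac)
      obtain ⟨hlt, _, _⟩ := PySem.List.getElem_of_index?_eq_some hk
      rw [hk]
      simpa using hlt

lemma sorted_set_eq_dedup (cs : List String) :
    PySem.List.sorted (PySem.Set.ofList cs)
      (fun c => ((PySem.List.index? cs c).getD 0 : Nat)) false
    = PySem.List.dedup cs := by
  refine PySem.List.sorted_eq_of_perm_of_pairwise_lt _ _
    (fun c => ((PySem.List.index? cs c).getD 0 : Nat)) ?_ (dedup_pairwise_index cs)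
  rw [PySem.List.dedup_eq_ofList]

-- ===== VERDICT (by name: the statement is the Claim_ definition above) =====
theorem reduce_hand_spec : Claim_equal_reduce_hand := by
  intro hand _ _
  unfold Spec_reduce_hand reduce_hand_alt
  show reduce_hand hand
      = hand.map (fun p =>
          (PySem.List.pyGetD COLORS
            (((PySem.List.index?
                (PySem.List.sorted (PySem.Set.ofList (hand.map (fun p => p.1)))
                  (fun c => ((PySem.List.index? (hand.map (fun p => p.1)) c).getD 0 : Nat)) false)
                p.1).getD 0 : Nat) : Int) "", p.2))
  rw [reduce_hand_eq, sorted_set_eq_dedup]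
  apply List.map_congr_left
  intro q hq
  have hqc : q.1 ∈ hand.map (fun p => p.1) := List.mem_map_of_mem hq
  have hqd : q.1 ∈ PySem.List.dedup (hand.map (fun p => p.1)) :=
    (PySem.List.mem_dedup _ _).mpr hqc
  obtain ⟨k, hk⟩ := Option.isSome_iff_exists.mp
    ((PySem.List.index?_isSome_iff _ q.1).mpr hqd)
  rw [mapOf, PySem.Dict.getD_eq_get?_getD,
    get?_dictOf _ (PySem.List.nodup_dedup _), hk]
  rfl
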